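-- pv_equiv track=rewrite | github.com/reedhodges/advent_of_code_2023 | aoc-5.py | find_appr_line_in_map_inv
-- ===== SOURCE A (Python) =====
-- def find_appr_line_in_map_inv(destination, appr_map):
--     # sort the map by the first element
--     appr_map = sorted(appr_map, key=lambda x: x[0])
--     i = 0
--     # find which sublist has the destination range start appropriate for the destination
--     # this is the largest second element which is less than or equal to the destination
--     while destination >= appr_map[i][0]:
--         # if we've reached the end of the list, return the last element
--         if i == len(appr_map) - 1:
--             return i
--         i += 1
--     if i == 0:
--         return 'You have passed a destination which is invalid'
--     return i-1
-- ===== SOURCE B (Python) =====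
-- def find_appr_line_in_map_inv(destination, appr_map):
--     # The sought index is the position, in the map sorted by range start, of the
--     # last sublist whose start is <= destination.  In a sorted list that position
--     # is simply (number of sublists with start <= destination) - 1, so count in
--     # one pass without sorting at all.
--     return sum(1 for row in appr_map if row[0] <= destination) - 1
-- ===== Notes on version B (the rewrite author's own statement) =====
-- stated objective: simpler
-- what changed: B drops the sort and the index-walking while loop entirely: in the sorted map the answer is just (number of rows whose start is <= destination) - 1, so B computes that count in a single unsorted pass.
-- outside the precondition, e.g. on find_appr_line_in_map_inv(0, [[5, 9, 3]]): A returns 'You have passed a destination which is invalid', B returns -1; on find_appr_line_in_map_inv(0, []): A raises IndexError, B returns -1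
import Mathlib
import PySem

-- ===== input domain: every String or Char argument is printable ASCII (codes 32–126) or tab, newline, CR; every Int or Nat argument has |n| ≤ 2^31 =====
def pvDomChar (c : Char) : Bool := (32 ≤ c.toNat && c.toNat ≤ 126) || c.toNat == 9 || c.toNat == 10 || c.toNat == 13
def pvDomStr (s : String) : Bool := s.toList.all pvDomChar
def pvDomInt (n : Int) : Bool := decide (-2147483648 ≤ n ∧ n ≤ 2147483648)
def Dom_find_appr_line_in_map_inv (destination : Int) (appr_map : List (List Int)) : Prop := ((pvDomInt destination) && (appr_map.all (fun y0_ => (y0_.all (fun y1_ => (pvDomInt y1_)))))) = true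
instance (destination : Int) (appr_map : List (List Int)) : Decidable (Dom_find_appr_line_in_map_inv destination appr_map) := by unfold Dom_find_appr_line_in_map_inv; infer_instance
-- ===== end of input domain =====

-- B replaces A's sort + linear index walk by a single counting pass (objective: simpler).

-- ===== PORT A =====
-- The while loop of A, as recursion on a fuel counter (fuel = len - i on every call
-- reached within Pre_, so the 0-fuel branch is never taken there).
def pvLoopA (destination : Int) (a : List (List Int)) (i : Nat) (fuel : Nat) : Int :=
  match fuel with
  | 0 => 0
  | fuel + 1 =>
    -- while destination >= appr_map[i][0]   (row access exact in range; Pre_ keeps it there)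
    if ((PySem.List.pyGet? a (i : Int)).getD []).headD 0 ≤ destination then
      if i = a.length - 1 then (i : Int)
      else pvLoopA destination a (i + 1) fuel
    else if i = 0 then 0  -- Python returns a STRING here (not an Int): excluded by Pre_
    else (i : Int) - 1

def find_appr_line_in_map_inv (destination : Int) (appr_map : List (List Int)) : Int :=
  -- sorted(appr_map, key=lambda x: x[0]); key ported as headD 0 (exact: Pre_ keeps rows nonempty)
  let a := PySem.List.sorted appr_map (fun x => x.headD 0)
  pvLoopA destination a 0 a.length

-- ===== PORT B =====
def find_appr_line_in_map_inv_alt (destination : Int) (appr_map : List (List Int)) : Int :=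
  -- sum(1 for row in appr_map if row[0] <= destination) - 1
  (appr_map.foldl (fun acc row => if row.headD 0 ≤ destination then acc + 1 else acc) (0 : Int)) - 1

-- ===== PRECONDITION & SPEC =====
-- Pre_ excludes exactly where Python A does not return an int: an empty map or a map
-- containing an empty row (IndexError), and a destination smaller than every range start,
-- where A returns the string 'You have passed a destination which is invalid'.
def Pre_find_appr_line_in_map_inv (destination : Int) (appr_map : List (List Int)) : Prop :=
  appr_map ≠ [] ∧ (∀ row ∈ appr_map, row ≠ []) ∧ ∃ row ∈ appr_map, row.headD 0 ≤ destination
instance (destination : Int) (appr_map : List (List Int)) : Decidable (Pre_find_appr_line_in_map_inv destination appr_map) := by unfold Pre_find_appr_line_in_map_inv; infer_instance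

def pvWitness_find_appr_line_in_map_inv : Int × List (List Int) := (10, [[5, 9, 3], [20, 1, 2]])

def Spec_find_appr_line_in_map_inv (destination : Int) (appr_map : List (List Int)) (out : Int) : Prop := out = find_appr_line_in_map_inv_alt destination appr_map
instance (destination : Int) (appr_map : List (List Int)) (out : Int) : Decidable (Spec_find_appr_line_in_map_inv destination appr_map out) := by unfold Spec_find_appr_line_in_map_inv; infer_instance

-- ===== CLAIM (what is proved, stated in full; the proofs are below) =====
def Claim_equal_find_appr_line_in_map_inv : Prop := ∀ (destination : Int) (appr_map : List (List Int)), Dom_find_appr_line_in_map_inv destination appr_map → Pre_find_appr_line_in_map_inv destination appr_map → Spec_find_appr_line_in_map_inv destination appr_map (find_appr_line_in_map_inv destination appr_map)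

-- ===== LEMMAS AND PROOFS =====

-- In a ≤-sorted Int list, an element is ≤ d exactly when its index is below the count of elements ≤ d.
lemma pvSorted_le_iff_lt_countP (d : Int) :
    ∀ (l : List Int), l.Pairwise (· ≤ ·) → ∀ j : Nat, (hj : j < l.length) →
      (l[j] ≤ d ↔ j < l.countP (fun x => decide (x ≤ d))) := by
  intro l hl
  induction hl with
  | nil => intro j hj; simp at hj
  | cons hx ht ih =>
    intro j hj
    rename_i x t
    cases j with
    | zero =>
      simp only [List.getElem_cons_zero, List.countP_cons]
      constructor
      · intro h; simp [h]
      · intro h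
        by_contra hxd
        have hpos : 0 < t.countP (fun x => decide (x ≤ d)) := by
          have hdx : (decide (x ≤ d)) = false := decide_eq_false hxd
          simpa [hdx] using h
        obtain ⟨y, hy, hyd⟩ := List.countP_pos_iff.mp hpos
        exact hxd (le_trans (hx y hy) (by simpa using hyd))
    | succ j =>
      simp only [List.getElem_cons_succ, List.countP_cons]
      rw [ih j (by simpa using hj)]
      by_cases hxd : x ≤ d
      · simp [hxd]
      · -- ¬ x ≤ d and sortedness force the count over t to be 0
        have h0 : t.countP (fun x => decide (x ≤ d)) = 0 := by
          rw [List.countP_eq_zero]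
          intro y hy
          simp only [decide_eq_true_eq]
          exact fun hyd => hxd (le_trans (hx y hy) hyd)
        simp [hxd, h0]

-- The while loop of A computes count-1 on a sorted map.
lemma pvLoopA_eq (d : Int) (a : List (List Int))
    (hs : (a.map (fun r => r.headD 0)).Pairwise (· ≤ ·)) :
    ∀ fuel i, fuel = a.length - i → i < a.length →
      i ≤ a.countP (fun r => decide (r.headD 0 ≤ d)) →
      1 ≤ a.countP (fun r => decide (r.headD 0 ≤ d)) →
      pvLoopA d a i fuel = (a.countP (fun r => decide (r.headD 0 ≤ d)) : Int) - 1 := by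
  intro fuel
  induction fuel with
  | zero => intro i hfuel hi _ _; omega
  | succ fuel ih =>
    intro i hfuel hi hic hc
    set c := a.countP (fun r => decide (r.headD 0 ≤ d)) with hcdef
    have hcl : c ≤ a.length := List.countP_le_length
    have hget : PySem.List.pyGet? a (i : Int) = some a[i] := by
      rw [PySem.List.pyGet?_natCast]; exact List.getElem?_eq_getElem hi
    have hchar : (a[i].headD 0 ≤ d ↔ i < c) := by
      have := pvSorted_le_iff_lt_countP d (a.map (fun r => r.headD 0)) hs i (by simpa using hi)
      simpa [List.countP_map, Function.comp_def, hcdef] using this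
    unfold pvLoopA
    rw [hget]
    simp only [Option.getD_some]
    by_cases hcond : a[i].headD 0 ≤ d
    · have hiltc : i < c := hchar.mp hcond
      rw [if_pos hcond]
      by_cases hlast : i = a.length - 1
      · rw [if_pos hlast]
        omega
      · rw [if_neg hlast]
        exact ih (i + 1) (by omega) (by omega) (by omega) hc
    · have hige : c ≤ i := by by_contra h; exact hcond (hchar.mpr (by omega))
      have hi0 : i ≠ 0 := by omega
      rw [if_neg hcond, if_neg hi0]
      omega

-- B computes count-1 over the unsorted map.
lemma pvAlt_eq (d : Int) (m : List (List Int)) :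
    find_appr_line_in_map_inv_alt d m = (m.countP (fun r => decide (r.headD 0 ≤ d)) : Int) - 1 := by
  unfold find_appr_line_in_map_inv_alt
  rw [PySem.List.foldl_ite_add_one (fun r => r.headD 0 ≤ d) m 0]
  simp

-- ===== VERDICT (by name: the statement is the Claim_ definition above) =====
theorem find_appr_line_in_map_inv_spec : Claim_equal_find_appr_line_in_map_inv := by
  intro d m _ hpre
  obtain ⟨hne, _, r, hr, hrd⟩ := hpre
  unfold Spec_find_appr_line_in_map_inv find_appr_line_in_map_inv
  set a := PySem.List.sorted m (fun x => x.headD 0) with ha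
  have hperm : a.Perm m := PySem.List.sorted_perm m _ false
  have hcnt : a.countP (fun r => decide (r.headD 0 ≤ d)) = m.countP (fun r => decide (r.headD 0 ≤ d)) :=
    hperm.countP_eq _
  have hc1 : 1 ≤ a.countP (fun r => decide (r.headD 0 ≤ d)) := by
    rw [hcnt]
    exact List.countP_pos_iff.mpr ⟨r, hr, by simpa using hrd⟩
  have hlen : 0 < a.length := by
    rw [hperm.length_eq]
    exact List.length_pos_iff.mpr hne
  rw [pvLoopA_eq d a (PySem.List.sorted_map_key_pairwise m _) a.length 0 (by omega) hlen (by omega) hc1]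
  rw [pvAlt_eq, hcnt]
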